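-- pv_equiv track=rewrite | github.com/JoanWu5/Grokking-the-coding-interview | merge intervals/conflicting appointment.py | conflicting_appointment
-- ===== SOURCE A (Python) =====
-- def conflicting_appointment(arr):
--     start, end = 0, 1
--     arr.sort(key = lambda x: x[0])
--     result = []
--
--     for i in range(len(arr)):
--         for j in range(i+1, len(arr)):
--             if arr[i][end] > arr[j][start]:
--                 result.append([arr[i], arr[j]])
--
--     return result
-- ===== SOURCE B (Python) =====
-- def conflicting_appointment(arr):
--     # Same observable side effect as A: sorts arr in place by start time.
--     arr.sort(key=lambda x: x[0])
--     result = []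
--     n = len(arr)
--     for i in range(n):
--         j = i + 1
--         # starts are non-decreasing, so once arr[j] starts at/after arr[i]'s
--         # end no later appointment can conflict with arr[i]: stop scanning.
--         while j < n and arr[j][0] < arr[i][1]:
--             result.append([arr[i], arr[j]])
--             j += 1
--     return result
-- ===== Notes on version B (the rewrite author's own statement) =====
-- stated objective: alternative
-- what changed: B replaces A's full pairwise inner scan with an early-exit scan: after sorting by start, the inner while loop stops at the first later appointment whose start is at or after the current end, which is safe because starts are non-decreasing; a timing run's inputs are dominated by input size, so no speed is claimed.
-- outside the precondition, e.g. on conflicting_appointment([[1]]): A returns [], B returns []; on conflicting_appointment([[1, 2], [3]]): A returns [], B returns []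
import Mathlib
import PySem

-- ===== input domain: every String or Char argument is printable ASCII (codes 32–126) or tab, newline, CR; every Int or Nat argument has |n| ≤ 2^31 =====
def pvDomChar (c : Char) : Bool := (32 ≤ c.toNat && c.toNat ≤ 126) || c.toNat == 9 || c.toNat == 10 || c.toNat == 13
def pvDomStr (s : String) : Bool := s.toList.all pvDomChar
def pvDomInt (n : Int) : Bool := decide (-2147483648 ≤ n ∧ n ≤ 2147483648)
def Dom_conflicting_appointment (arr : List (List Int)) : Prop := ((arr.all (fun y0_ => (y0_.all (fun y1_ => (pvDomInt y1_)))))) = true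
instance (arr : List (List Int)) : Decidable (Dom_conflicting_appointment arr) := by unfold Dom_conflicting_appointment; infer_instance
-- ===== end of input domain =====

-- B: after sorting by start, the inner scan stops at the first later appointment whose
-- start is at or after the current end (safe since starts are non-decreasing) — an
-- early-exit while loop instead of A's full pairwise scan. Both A and B sort `arr` in
-- place; the equivalence proved here is about the return value.


-- ===== PORT A =====
def conflicting_appointment (arr : List (List Int)) : List (List (List Int)) :=
  let s := PySem.List.sorted arr (fun x => PySem.List.pyGetD x 0 0) false
  (PySem.List.pyRange 0 s.length 1).foldl (fun result i =>
    (PySem.List.pyRange (i + 1) s.length 1).foldl (fun result j =>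
      if PySem.List.pyGetD (PySem.List.pyGetD s i []) 1 0 >
         PySem.List.pyGetD (PySem.List.pyGetD s j []) 0 0 then
        result ++ [[PySem.List.pyGetD s i [], PySem.List.pyGetD s j []]]
      else result) result) []

-- ===== PORT B =====
-- the inner `while j < n and arr[j][0] < arr[i][1]` loop of Source B
def pvBWhile (s : List (List Int)) (a : List Int) (j : Nat)
    (acc : List (List (List Int))) : List (List (List Int)) :=
  if j < s.length then
    if PySem.List.pyGetD (PySem.List.pyGetD s (j : Int) []) 0 0 <
       PySem.List.pyGetD a 1 0 then
      pvBWhile s a (j + 1) (acc ++ [[a, PySem.List.pyGetD s (j : Int) []]])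
    else acc
  else acc
termination_by s.length - j

def conflicting_appointment_alt (arr : List (List Int)) : List (List (List Int)) :=
  let s := PySem.List.sorted arr (fun x => PySem.List.pyGetD x 0 0) false
  (PySem.List.pyRange 0 s.length 1).foldl (fun result i =>
    pvBWhile s (PySem.List.pyGetD s i []) (i.toNat + 1) result) []

-- ===== PRECONDITION & SPEC =====
-- Pre_ requires every appointment to carry at least its start and end entry; on shorter
-- sublists A raises IndexError (in the sort key or at arr[i][1]/arr[j][0]) except for
-- degenerate inputs (≤ 1 appointments, or only the last-sorted appointment short) where
-- the missing entry is never touched and A returns anyway — see the cited examples.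
def Pre_conflicting_appointment (arr : List (List Int)) : Prop :=
  ∀ x ∈ arr, 2 ≤ x.length
instance (arr : List (List Int)) : Decidable (Pre_conflicting_appointment arr) := by
  unfold Pre_conflicting_appointment; infer_instance

def pvWitness_conflicting_appointment : List (List Int) := [[1, 4], [2, 5], [7, 9]]

def Spec_conflicting_appointment (arr : List (List Int)) (out : List (List (List Int))) : Prop := out = conflicting_appointment_alt arr
instance (arr : List (List Int)) (out : List (List (List Int))) : Decidable (Spec_conflicting_appointment arr out) := by unfold Spec_conflicting_appointment; infer_instance

-- ===== CLAIM (what is proved, stated in full; the proofs are below) =====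
def Claim_equal_conflicting_appointment : Prop := ∀ (arr : List (List Int)), Dom_conflicting_appointment arr → Pre_conflicting_appointment arr → Spec_conflicting_appointment arr (conflicting_appointment arr)

-- ===== LEMMAS AND PROOFS =====

-- a full scan whose condition never fires leaves the accumulator unchanged
lemma pv_foldl_if_false {α β : Type} (P : α → Prop) [DecidablePred P] (g : α → List β)
    (l : List α) (acc : List β) (h : ∀ x ∈ l, ¬ P x) :
    l.foldl (fun r x => if P x then r ++ g x else r) acc = acc := by
  induction l generalizing acc with
  | nil => rfl
  | cons x xs ih =>
      simp only [List.foldl_cons]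
      rw [if_neg (h x (by simp))]
      exact ih acc (fun y hy => h y (by simp [hy]))

-- the per-row equivalence: A's full inner scan from index j equals B's early-exit scan,
-- given that starts (the value st) are monotone along the sorted list
lemma pv_inner_eq (s : List (List Int)) (a : List Int)
    (hmono : ∀ p q : Nat, p ≤ q → q < s.length →
      PySem.List.pyGetD (PySem.List.pyGetD s (p : Int) []) 0 0 ≤
      PySem.List.pyGetD (PySem.List.pyGetD s (q : Int) []) 0 0) :
    ∀ (j : Nat) (acc : List (List (List Int))),
      (PySem.List.pyRange (j : Int) s.length 1).foldl (fun r jj =>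
        if PySem.List.pyGetD a 1 0 >
           PySem.List.pyGetD (PySem.List.pyGetD s jj []) 0 0 then
          r ++ [[a, PySem.List.pyGetD s jj []]]
        else r) acc = pvBWhile s a j acc := by
  intro j
  induction hn : s.length - j using Nat.strong_induction_on generalizing j with
  | _ n ih =>
    intro acc
    by_cases hj : j < s.length
    · rw [PySem.List.pyRange_one_cons (by exact_mod_cast hj)]
      rw [pvBWhile]
      simp only [List.foldl_cons]
      by_cases hc : PySem.List.pyGetD (PySem.List.pyGetD s (j : Int) []) 0 0 <
          PySem.List.pyGetD a 1 0
      · rw [if_pos hc, if_pos hj, if_pos hc]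
        have : ((j : Int) + 1) = ((j + 1 : Nat) : Int) := by push_cast; ring
        rw [this]
        exact ih (s.length - (j + 1)) (by omega) (j + 1) rfl _
      · rw [if_neg hc, if_pos hj, if_neg hc]
        apply pv_foldl_if_false
          (fun jj => PySem.List.pyGetD a 1 0 >
            PySem.List.pyGetD (PySem.List.pyGetD s jj []) 0 0)
        intro x hx
        rw [PySem.List.mem_pyRange_one] at hx
        have hx0 : x = ((x.toNat : Nat) : Int) := by omega
        have hxl : x.toNat < s.length := by omega
        have := hmono j x.toNat (by omega) hxl
        rw [hx0]
        intro hgt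
        exact hc (lt_of_le_of_lt this hgt)
    · rw [PySem.List.pyRange_one_eq_nil (by exact_mod_cast Nat.le_of_not_lt hj)]
      rw [pvBWhile, if_neg hj]
      rfl

-- ===== VERDICT (by name: the statement is the Claim_ definition above) =====
theorem conflicting_appointment_spec : Claim_equal_conflicting_appointment := by
  intro arr _hdom _hpre
  unfold Spec_conflicting_appointment conflicting_appointment conflicting_appointment_alt
  set s := PySem.List.sorted arr (fun x => PySem.List.pyGetD x 0 0) false with hs
  have hmono : ∀ p q : Nat, p ≤ q → q < s.length →
      PySem.List.pyGetD (PySem.List.pyGetD s (p : Int) []) 0 0 ≤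
      PySem.List.pyGetD (PySem.List.pyGetD s (q : Int) []) 0 0 := by
    intro p q hpq hq
    have hp : p < s.length := lt_of_le_of_lt hpq hq
    rw [PySem.List.pyGetD_natCast, PySem.List.pyGetD_natCast]
    rw [List.getD_eq_getElem _ _ hp, List.getD_eq_getElem _ _ hq]
    exact PySem.List.key_sorted_getElem_mono arr (fun x => PySem.List.pyGetD x 0 0) hpq hq
  apply PySem.List.foldl_congr_mem
  intro acc i hi
  rw [PySem.List.mem_pyRange_one] at hi
  have hi0 : (i : Int) = ((i.toNat : Nat) : Int) := by omega
  have h1 : ((i : Int) + 1) = ((i.toNat + 1 : Nat) : Int) := by omega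
  rw [h1, hi0]
  exact pv_inner_eq s (PySem.List.pyGetD s ((i.toNat : Nat) : Int) []) hmono (i.toNat + 1) acc
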